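-- pv_equiv track=rewrite | github.com/anshulku/Jigsaw_Puzzle | DvS.py | pointsInBetween
-- ===== SOURCE A (Python) =====
-- def pointsInBetween(startIndex,endIndex,approx):
--     count=0
--     startIndex=startIndex+1
--     if(startIndex>=len(approx)):
--         startIndex=0
--     while(startIndex!=endIndex):
--         count=count+1
--         startIndex=startIndex+1
--         if(startIndex>=len(approx)):
--             startIndex=0
--     return count
-- ===== SOURCE B (Python) =====
-- def pointsInBetween(startIndex, endIndex, approx):
--     # O(1) closed form: circular distance from the slot after startIndex to endIndex
--     n = len(approx)
--     s1 = startIndex + 1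
--     if s1 >= n:
--         s1 = 0
--     d = endIndex - s1
--     return d if d >= 0 else d + n
-- ===== Notes on version B (the rewrite author's own statement) =====
-- stated objective: faster
-- what changed: replaced the one-step-at-a-time circular walk with an O(1) closed form: count = endIndex - s1 (plus len(approx) if negative), where s1 is the wrapped start slot
import Mathlib
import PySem

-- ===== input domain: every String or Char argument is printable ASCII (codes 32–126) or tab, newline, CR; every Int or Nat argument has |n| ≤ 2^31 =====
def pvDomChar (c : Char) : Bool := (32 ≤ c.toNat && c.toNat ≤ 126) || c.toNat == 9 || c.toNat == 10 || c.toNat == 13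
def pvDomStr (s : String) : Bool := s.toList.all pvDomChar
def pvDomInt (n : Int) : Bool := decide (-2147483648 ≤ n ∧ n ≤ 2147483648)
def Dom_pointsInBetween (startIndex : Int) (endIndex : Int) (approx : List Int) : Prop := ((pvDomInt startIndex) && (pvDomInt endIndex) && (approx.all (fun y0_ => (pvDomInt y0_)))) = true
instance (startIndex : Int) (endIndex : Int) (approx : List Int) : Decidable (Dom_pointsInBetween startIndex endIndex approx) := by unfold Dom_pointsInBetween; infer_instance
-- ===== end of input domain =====

-- B replaces A's one-step circular walk by the O(1) closed form (endIndex - startIndex - 1) % len(approx).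

-- ===== PORT A =====
-- the while loop, step for step: while i != endIndex: count += 1; i += 1; if i >= n: i = 0
-- fuel: on every input on which the Python loop terminates it performs at most
-- (endIndex - s1 + n) iterations (s1 = wrapped start), so this fuel always suffices there.
def pointsInBetweenLoop (endIndex n : Int) : Nat → Int → Int → Int
  | 0, _, count => count
  | fuel + 1, i, count =>
    if i ≠ endIndex then
      pointsInBetweenLoop endIndex n fuel (if i + 1 ≥ n then 0 else i + 1) (count + 1)
    else count

-- startIndex = startIndex + 1; if startIndex >= len(approx): startIndex = 0; then the loop with count = 0
def pointsInBetween (startIndex : Int) (endIndex : Int) (approx : List Int) : Int :=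
  pointsInBetweenLoop endIndex (approx.length : Int)
    (endIndex - (if startIndex + 1 ≥ (approx.length : Int) then 0 else startIndex + 1)
      + (approx.length : Int) + 1).toNat
    (if startIndex + 1 ≥ (approx.length : Int) then 0 else startIndex + 1) 0

-- ===== PORT B =====
def pointsInBetween_alt (startIndex : Int) (endIndex : Int) (approx : List Int) : Int :=
  let n : Int := approx.length
  let s1 : Int := if startIndex + 1 ≥ n then 0 else startIndex + 1
  let d : Int := endIndex - s1
  if d ≥ 0 then d else d + n

-- ===== PRECONDITION & SPEC =====
-- Pre_ is exactly the set of inputs on which A's while loop terminates (A raises nothing, but it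
-- diverges whenever endIndex is never hit by the circular walk, e.g. endIndex ≥ len(approx) ≥ 1).
def Pre_pointsInBetween (startIndex : Int) (endIndex : Int) (approx : List Int) : Prop :=
  let n : Int := approx.length
  let s1 : Int := if startIndex + 1 ≥ n then 0 else startIndex + 1
  (s1 ≤ endIndex ∧ endIndex < n) ∨ (0 ≤ endIndex ∧ endIndex < n) ∨
    (n = 0 ∧ s1 ≤ endIndex ∧ endIndex ≤ 0)
instance (startIndex : Int) (endIndex : Int) (approx : List Int) : Decidable (Pre_pointsInBetween startIndex endIndex approx) := by unfold Pre_pointsInBetween; infer_instance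

def pvWitness_pointsInBetween : Int × Int × List Int := (2, 1, [5, 6, 7, 8])

def Spec_pointsInBetween (startIndex : Int) (endIndex : Int) (approx : List Int) (out : Int) : Prop := out = pointsInBetween_alt startIndex endIndex approx
instance (startIndex : Int) (endIndex : Int) (approx : List Int) (out : Int) : Decidable (Spec_pointsInBetween startIndex endIndex approx out) := by unfold Spec_pointsInBetween; infer_instance

-- ===== CLAIM (what is proved, stated in full; the proofs are below) =====
def Claim_equal_pointsInBetween : Prop := ∀ (startIndex : Int) (endIndex : Int) (approx : List Int), Dom_pointsInBetween startIndex endIndex approx → Pre_pointsInBetween startIndex endIndex approx → Spec_pointsInBetween startIndex endIndex approx (pointsInBetween startIndex endIndex approx)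

-- ===== LEMMAS AND PROOFS =====

-- One loop iteration decrements the remaining distance and preserves the index shape.
-- dist i = remaining iterations from index i: e - i on the straight stretch (i ≤ e),
-- e - i + n once i has passed e (then 0 ≤ e < n).
theorem pv_step (e n i : Int) (hE : e < n ∨ (n = 0 ∧ e ≤ 0))
    (hP : i ≤ e ∨ (0 ≤ e ∧ i < n)) (hie : i ≠ e) :
    ((if (if i + 1 ≥ n then 0 else i + 1) ≤ e then e - (if i + 1 ≥ n then 0 else i + 1)
        else e - (if i + 1 ≥ n then 0 else i + 1) + n)
      = (if i ≤ e then e - i else e - i + n) - 1)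
    ∧ ((if i + 1 ≥ n then 0 else i + 1) ≤ e ∨ (0 ≤ e ∧ (if i + 1 ≥ n then 0 else i + 1) < n)) := by
  constructor <;> split_ifs <;> omega

-- Loop invariant: with enough fuel the loop returns count + dist i.
theorem pointsInBetweenLoop_eq (e n : Int) (hE : e < n ∨ (n = 0 ∧ e ≤ 0)) :
    ∀ (fuel : Nat) (i count : Int), (i ≤ e ∨ (0 ≤ e ∧ i < n)) →
      (if i ≤ e then e - i else e - i + n).toNat ≤ fuel →
      pointsInBetweenLoop e n fuel i count
        = count + (if i ≤ e then e - i else e - i + n) := by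
  intro fuel
  induction fuel with
  | zero =>
    intro i count hP hf
    have hz : (if i ≤ e then e - i else e - i + n) = 0 := by split_ifs <;> omega
    rw [pointsInBetweenLoop, hz, add_zero]
  | succ f ih =>
    intro i count hP hf
    by_cases hie : i = e
    · subst hie
      rw [pointsInBetweenLoop, if_neg (by simp), if_pos le_rfl, sub_self, add_zero]
    · have hstep := pv_step e n i hE hP hie
      have hd1 : 1 ≤ (if i ≤ e then e - i else e - i + n) := by split_ifs <;> omega
      have hf' : (if (if i + 1 ≥ n then 0 else i + 1) ≤ e then e - (if i + 1 ≥ n then 0 else i + 1)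
          else e - (if i + 1 ≥ n then 0 else i + 1) + n).toNat ≤ f := by
        rw [hstep.1]; omega
      rw [pointsInBetweenLoop, if_pos hie, ih _ (count + 1) hstep.2 hf', hstep.1]
      ring

-- ===== VERDICT (by name: the statement is the Claim_ definition above) =====
theorem pointsInBetween_spec : Claim_equal_pointsInBetween := by
  intro s e approx _ hpre
  unfold Pre_pointsInBetween at hpre
  unfold Spec_pointsInBetween pointsInBetween pointsInBetween_alt
  simp only [] at hpre ⊢
  have hn0 : (0 : Int) ≤ (approx.length : Int) := Int.natCast_nonneg _
  have hE : e < (approx.length : Int) ∨ ((approx.length : Int) = 0 ∧ e ≤ 0) := by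
    rcases hpre with h | h | h
    · exact Or.inl h.2
    · exact Or.inl h.2
    · exact Or.inr ⟨h.1, h.2.2⟩
  have hP : (if s + 1 ≥ (approx.length : Int) then 0 else s + 1) ≤ e ∨
      (0 ≤ e ∧ (if s + 1 ≥ (approx.length : Int) then 0 else s + 1) < (approx.length : Int)) := by
    rcases hpre with h | h | h
    · exact Or.inl h.1
    · refine Or.inr ⟨h.1, ?_⟩
      split_ifs <;> omega
    · exact Or.inl h.2.1
  have hf : (if (if s + 1 ≥ (approx.length : Int) then 0 else s + 1) ≤ e then
        e - (if s + 1 ≥ (approx.length : Int) then 0 else s + 1)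
        else e - (if s + 1 ≥ (approx.length : Int) then 0 else s + 1) + (approx.length : Int)).toNat
      ≤ (e - (if s + 1 ≥ (approx.length : Int) then 0 else s + 1) + (approx.length : Int) + 1).toNat := by
    split_ifs <;> omega
  rw [pointsInBetweenLoop_eq e (approx.length : Int) hE _ _ 0 hP hf, zero_add]
  split_ifs <;> omega
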